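-- pv_equiv track=rewrite | github.com/LC1332/Luotuo-Text-Embedding | lib/tsne.py | show_text
-- ===== SOURCE A (Python) =====
-- def show_text(show_sentence, text):
--     sentence = []
--     for i in range(len(text)):
--         if i in show_sentence:
--             s = text[i][:10] + "..." + text[i][-10:]
--             sentence.append(s)
--         else:
--             sentence.append("")
--     return sentence
-- ===== SOURCE B (Python) =====
-- def show_text(show_sentence, text):
--     sentence = [""] * len(text)
--     for i in show_sentence:
--         if 0 <= i < len(text):
--             sentence[i] = text[i][:10] + "..." + text[i][-10:]
--     return sentence
-- ===== Notes on version B (the rewrite author's own statement) =====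
-- stated objective: alternative
-- what changed: B pre-allocates a list of empty strings and patches the selected in-range indices by iterating show_sentence, instead of scanning all of text and testing membership of each index in show_sentence.
import Mathlib
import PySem

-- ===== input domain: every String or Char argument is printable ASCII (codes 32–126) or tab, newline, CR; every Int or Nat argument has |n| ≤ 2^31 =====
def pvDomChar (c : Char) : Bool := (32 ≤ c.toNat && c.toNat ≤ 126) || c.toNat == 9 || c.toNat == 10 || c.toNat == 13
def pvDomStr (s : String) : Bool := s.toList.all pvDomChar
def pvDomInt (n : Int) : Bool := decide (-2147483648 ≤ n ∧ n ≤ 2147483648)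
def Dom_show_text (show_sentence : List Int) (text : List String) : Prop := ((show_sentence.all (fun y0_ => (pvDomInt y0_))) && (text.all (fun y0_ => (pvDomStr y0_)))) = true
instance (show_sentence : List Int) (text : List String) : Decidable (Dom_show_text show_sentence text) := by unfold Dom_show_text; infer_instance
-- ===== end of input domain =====

-- B pre-allocates len(text) empty strings and patches the selected in-range indices
-- by iterating show_sentence, instead of scanning text and testing membership (alternative decomposition).


-- text[i][:10] + "..." + text[i][-10:] (shared literal subexpression of both Pythons)
def pvFmt (s : String) : String :=
  String.ofList (PySem.List.slice s.toList none (some 10) ++ "...".toList ++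
             PySem.List.slice s.toList (some (-10)) none)

-- ===== PORT A =====
def show_text (show_sentence : List Int) (text : List String) : List String :=
  (PySem.List.pyRange 0 (text.length : Int) 1).foldl
    (fun sentence i =>
      if show_sentence.contains i then
        sentence ++ [pvFmt (PySem.List.pyGetD text i "")]
      else
        sentence ++ [""])
    []

-- ===== PORT B =====
def show_text_alt (show_sentence : List Int) (text : List String) : List String :=
  show_sentence.foldl
    (fun sentence i =>
      if 0 ≤ i ∧ i < (text.length : Int) then
        PySem.List.pySetD sentence i (pvFmt (PySem.List.pyGetD text i ""))
      else
        sentence)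
    (List.replicate text.length "")

-- ===== PRECONDITION & SPEC =====
def Spec_show_text (show_sentence : List Int) (text : List String) (out : List String) : Prop := out = show_text_alt show_sentence text
instance (show_sentence : List Int) (text : List String) (out : List String) : Decidable (Spec_show_text show_sentence text out) := by unfold Spec_show_text; infer_instance

-- ===== CLAIM (what is proved, stated in full; the proofs are below) =====
def Claim_equal_show_text : Prop := ∀ (show_sentence : List Int) (text : List String), Dom_show_text show_sentence text → Spec_show_text show_sentence text (show_text show_sentence text)

-- ===== LEMMAS AND PROOFS =====

-- A's loop, as a map over the index range
lemma show_text_eq_map (ss : List Int) (text : List String) :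
    show_text ss text =
      (List.range text.length).map
        (fun (j : Nat) => if ss.contains (j : Int) then pvFmt (text.getD j "") else "") := by
  unfold show_text
  rw [show (fun (sentence : List String) (i : Int) =>
        if ss.contains i then sentence ++ [pvFmt (PySem.List.pyGetD text i "")]
        else sentence ++ [""]) =
      (fun sentence i => sentence ++
        [if ss.contains i then pvFmt (PySem.List.pyGetD text i "") else ""]) from
      funext fun s => funext fun i => by split <;> rfl]
  rw [PySem.List.foldl_append_singleton_eq_map, PySem.List.pyRange_one, List.map_map]
  simp

-- B's loop: its value at every index, by induction on show_sentence
lemma show_text_alt_fold (text : List String) (ss : List Int) (acc : List String)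
    (h : acc.length = text.length) :
    ss.foldl (fun sentence i =>
        if 0 ≤ i ∧ i < (text.length : Int) then
          PySem.List.pySetD sentence i (pvFmt (PySem.List.pyGetD text i ""))
        else sentence) acc =
      (List.range text.length).map
        (fun (j : Nat) => if (j : Int) ∈ ss then pvFmt (text.getD j "") else acc.getD j "") := by
  induction ss generalizing acc with
  | nil =>
      simp only [List.foldl_nil]
      apply List.ext_getElem (by simp [h])
      intro j hj hj'
      simp [List.getD, List.getElem?_eq_getElem hj]
  | cons i ss ih =>
      simp only [List.foldl_cons]
      by_cases hi : 0 ≤ i ∧ i < (text.length : Int)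
      · obtain ⟨m, rfl⟩ := Int.eq_ofNat_of_zero_le hi.1
        have hm : m < text.length := by exact_mod_cast hi.2
        rw [if_pos hi, ih _ (by simp [h])]
        apply List.map_congr_left
        intro j hj
        rw [List.mem_range] at hj
        by_cases hmem : (j : Int) ∈ ss
        · simp [hmem]
        · by_cases hij : m = j
          · subst hij
            have hmem2 : ((m : Nat) : Int) ∈ ((m : Nat) : Int) :: ss := by simp
            have hma : m < acc.length := by omega
            rw [if_neg hmem, if_pos hmem2]
            simp [PySem.List.pySetD_natCast, PySem.List.pyGetD_natCast,
                  List.getD, hma]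
          · have hnm : ¬ (j : Int) ∈ ((m : Nat) : Int) :: ss := by simp [hmem]; omega
            rw [if_neg hmem, if_neg hnm]
            simp [PySem.List.pySetD_natCast, List.getD, hij]
      · rw [if_neg hi, ih _ h]
        apply List.map_congr_left
        intro j hj
        rw [List.mem_range] at hj
        by_cases hmem : (j : Int) ∈ ss
        · simp [hmem]
        · have hij : i ≠ (j : Int) := by intro hE; apply hi; constructor <;> omega
          have hnm : ¬ (j : Int) ∈ i :: ss := by simp [hmem]; omega
          rw [if_neg hmem, if_neg hnm]

-- ===== VERDICT (by name: the statement is the Claim_ definition above) =====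
theorem show_text_spec : Claim_equal_show_text := by
  intro ss text _
  unfold Spec_show_text show_text_alt
  rw [show_text_eq_map, show_text_alt_fold text ss _ (List.length_replicate)]
  apply List.map_congr_left
  intro j hj
  rw [List.mem_range] at hj
  by_cases hmem : (j : Int) ∈ ss
  · simp [hmem]
  · simp [hmem, List.getD]
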